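-- pv_equiv track=rewrite | github.com/pisterlabs/promptset | data/scraping/repos/subercui~CodeExp/dataset~scripts~utils.py | compute_rank_pair_type
-- ===== SOURCE A (Python) =====
-- import operator
-- from typing import (
--     Iterable,
--     List,
--     Dict,
--     Literal,
--     Optional,
--     Tuple,
--     Union,
-- )
--
-- def compute_rank_pair_type(
--     human_ranking: Iterable[Union[int, float]],
--     metric_ranking: Iterable[Union[int, float]],
-- ) -> Union[Literal["c"], Literal["d"], Literal["t"], Literal["-"]]:
--     """
--     Given a pair of human and metric rankings,
--     computes the relative ranking. If the difference between
--     the two rankings is less than the provided threshold,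
--     the rank is the same.
--     Args:
--          human_ranking (Iterable[Union[int, float]]): A pair of human rankings.
--          metric_ranking (Iterable[Union[int, float]]): A pair of metric rankings.
--     Returns:
--          Union[Literal["c"], Literal["d"], Literal["t"], Literal["-"]]: The relative
--          ranking of the provided rankings
--     """
--     comparison_variant_b = [
--         (operator.lt, operator.lt, "c"),
--         (operator.lt, operator.eq, "t"),
--         (operator.lt, operator.gt, "d"),
--         (operator.gt, operator.lt, "d"),
--         (operator.gt, operator.eq, "t"),
--         (operator.gt, operator.gt, "c"),
--     ]
--
--     comparison_variant_c = [
--         (operator.lt, operator.lt, "c"),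
--         (operator.lt, operator.eq, "d"),
--         (operator.lt, operator.gt, "d"),
--         (operator.gt, operator.lt, "d"),
--         (operator.gt, operator.eq, "d"),
--         (operator.gt, operator.gt, "c"),
--     ]
--
--     comparison_variant_d = [
--         (operator.lt, operator.lt, "c"),  # <, <
--         (operator.lt, operator.eq, "t"),  # <, =
--         (operator.lt, operator.gt, "d"),  # <, >
--         (operator.eq, operator.lt, "t"),  # =, <
--         (operator.eq, operator.eq, "c"),
--         (operator.eq, operator.gt, "t"),  # =, >
--         (operator.gt, operator.lt, "d"),
--         (operator.gt, operator.eq, "t"),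
--         (operator.gt, operator.gt, "c"),
--     ]
--     comparison_table = comparison_variant_b
--
--     for h_op, m_op, outcome in comparison_table:
--         if h_op(*human_ranking) and m_op(*metric_ranking):
--             return outcome
--
--     return "-"
-- ===== SOURCE B (Python) =====
-- def compute_rank_pair_type(human_ranking, metric_ranking):
--     a, b = human_ranking
--     s_h = (a > b) - (a < b)
--     if s_h == 0:
--         return "-"
--     c, d = metric_ranking
--     s_m = (c > d) - (c < d)
--     return "dtc"[s_h * s_m + 1]
-- ===== Notes on version B (the rewrite author's own statement) =====
-- stated objective: alternative
-- what changed: Replaces A's 6-row operator comparison table scanned by a loop with sign arithmetic: the three-way sign of each pair's difference, an early '-' when the human sign is 0, and indexing the string 'dtc' by the product of the two signs plus one.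
import Mathlib
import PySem

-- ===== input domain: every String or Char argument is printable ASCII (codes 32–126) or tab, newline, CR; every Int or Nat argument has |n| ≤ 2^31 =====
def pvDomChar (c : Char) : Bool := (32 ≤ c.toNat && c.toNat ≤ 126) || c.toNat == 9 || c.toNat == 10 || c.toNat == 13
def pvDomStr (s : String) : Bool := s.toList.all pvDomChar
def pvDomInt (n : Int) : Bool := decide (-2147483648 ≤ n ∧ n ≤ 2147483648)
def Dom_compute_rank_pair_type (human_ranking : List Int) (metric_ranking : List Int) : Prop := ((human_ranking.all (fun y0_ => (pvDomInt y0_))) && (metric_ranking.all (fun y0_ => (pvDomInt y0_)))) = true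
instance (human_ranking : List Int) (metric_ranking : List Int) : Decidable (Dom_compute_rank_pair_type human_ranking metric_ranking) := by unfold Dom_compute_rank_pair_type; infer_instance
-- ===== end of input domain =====

-- B replaces A's 6-row operator comparison table with sign arithmetic: the three-way
-- sign of each pair, '-' when the human sign is 0, else "dtc" indexed by the sign
-- product plus one (objective: alternative).

-- ===== PORT A =====
-- op(*xs): applies a binary operator to a 2-element list; Pre_ guarantees the
-- unpacking succeeds wherever it is reached (Python raises TypeError otherwise).
def pvApply2 (op : Int → Int → Bool) (xs : List Int) : Bool :=
  match xs with
  | [a, b] => op a b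
  | _ => false

def pvComparisonVariantB : List ((Int → Int → Bool) × (Int → Int → Bool) × String) :=
  [ (fun a b => a < b, fun a b => a < b, "c"),
    (fun a b => a < b, fun a b => a == b, "t"),
    (fun a b => a < b, fun a b => b < a, "d"),
    (fun a b => b < a, fun a b => a < b, "d"),
    (fun a b => b < a, fun a b => a == b, "t"),
    (fun a b => b < a, fun a b => b < a, "c") ]

def pvTableLoop (table : List ((Int → Int → Bool) × (Int → Int → Bool) × String))
    (human_ranking metric_ranking : List Int) : String :=
  match table with
  | [] => "-"
  | (h_op, m_op, outcome) :: rest =>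
    if pvApply2 h_op human_ranking && pvApply2 m_op metric_ranking then outcome
    else pvTableLoop rest human_ranking metric_ranking

def compute_rank_pair_type (human_ranking : List Int) (metric_ranking : List Int) : String :=
  pvTableLoop pvComparisonVariantB human_ranking metric_ranking

-- ===== PORT B =====
-- (x > y) - (x < y) of Source B: the three-way sign of the comparison.
def pvSign (x y : Int) : Int :=
  (if y < x then 1 else 0) - (if x < y then 1 else 0)

def compute_rank_pair_type_alt (human_ranking : List Int) (metric_ranking : List Int) : String :=
  match human_ranking with
  | [a, b] =>
    let s_h := pvSign a b
    if s_h = 0 then "-"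
    else
      match metric_ranking with
      | [c, d] =>
        let s_m := pvSign c d
        ((PySem.Str.pyGet? "dtc" (s_h * s_m + 1)).map (fun ch => String.ofList [ch])).getD ""  -- none = IndexError, unreachable under Pre_
      | _ => ""  -- Python raises ValueError here (unpacking); excluded by Pre_
  | _ => ""      -- Python raises ValueError here (unpacking); excluded by Pre_

-- ===== PRECONDITION & SPEC =====
-- Python A raises TypeError (argument unpacking) unless human_ranking has exactly 2
-- elements and, whenever the human pair is not equal (so the metric operators run),
-- metric_ranking also has exactly 2 elements; Pre_ excludes exactly those raising inputs.
def Pre_compute_rank_pair_type (human_ranking : List Int) (metric_ranking : List Int) : Prop :=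
  human_ranking.length = 2 ∧
  (metric_ranking.length = 2 ∨ human_ranking.getD 0 0 = human_ranking.getD 1 0)
instance (human_ranking : List Int) (metric_ranking : List Int) : Decidable (Pre_compute_rank_pair_type human_ranking metric_ranking) := by unfold Pre_compute_rank_pair_type; infer_instance

def pvWitness_compute_rank_pair_type : List Int × List Int := ([0, 1], [2, 1])

def Spec_compute_rank_pair_type (human_ranking : List Int) (metric_ranking : List Int) (out : String) : Prop := out = compute_rank_pair_type_alt human_ranking metric_ranking
instance (human_ranking : List Int) (metric_ranking : List Int) (out : String) : Decidable (Spec_compute_rank_pair_type human_ranking metric_ranking out) := by unfold Spec_compute_rank_pair_type; infer_instance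

-- ===== CLAIM (what is proved, stated in full; the proofs are below) =====
def Claim_equal_compute_rank_pair_type : Prop := ∀ (human_ranking : List Int) (metric_ranking : List Int), Dom_compute_rank_pair_type human_ranking metric_ranking → Pre_compute_rank_pair_type human_ranking metric_ranking → Spec_compute_rank_pair_type human_ranking metric_ranking (compute_rank_pair_type human_ranking metric_ranking)

-- ===== LEMMAS AND PROOFS =====

-- ===== VERDICT (by name: the statement is the Claim_ definition above) =====
theorem compute_rank_pair_type_spec : Claim_equal_compute_rank_pair_type := by
  intro h m hdom hpre
  obtain ⟨hlen, hm⟩ := hpre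
  match h, hlen with
  | [a, b], _ =>
    rcases hm with hm2 | heq
    · match m, hm2 with
      | [c, d], _ =>
        simp only [Spec_compute_rank_pair_type, compute_rank_pair_type,
          compute_rank_pair_type_alt]
        rcases lt_trichotomy a b with hab | hab | hab
        · have hba : ¬ b < a := by omega
          have hsh : pvSign a b = -1 := by simp [pvSign, hab, hba]
          rcases lt_trichotomy c d with hcd | hcd | hcd
          · have hdc : ¬ d < c := by omega
            have hsm : pvSign c d = -1 := by simp [pvSign, hcd, hdc]
            simp [pvTableLoop, pvComparisonVariantB, pvApply2, hab, hcd, hsh, hsm]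
          · subst hcd
            have hsm : pvSign c c = 0 := by simp [pvSign]
            simp [pvTableLoop, pvComparisonVariantB, pvApply2, hab, hsh, hsm]
          · have hdc : ¬ c < d := by omega
            have hsm : pvSign c d = 1 := by simp [pvSign, hcd, hdc]
            simp [pvTableLoop, pvComparisonVariantB, pvApply2, hab, hcd, hdc, hsh, hsm,
              show c ≠ d by omega]
        · subst hab
          have hsh : pvSign a a = 0 := by simp [pvSign]
          simp [pvTableLoop, pvComparisonVariantB, pvApply2, hsh]
        · have hba : ¬ a < b := by omega
          have hsh : pvSign a b = 1 := by simp [pvSign, hab, hba]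
          rcases lt_trichotomy c d with hcd | hcd | hcd
          · have hdc : ¬ d < c := by omega
            have hsm : pvSign c d = -1 := by simp [pvSign, hcd, hdc]
            simp [pvTableLoop, pvComparisonVariantB, pvApply2, hab, hba, hcd, hdc, hsh, hsm]
          · subst hcd
            have hsm : pvSign c c = 0 := by simp [pvSign]
            simp [pvTableLoop, pvComparisonVariantB, pvApply2, hab, hba, hsh, hsm]
          · have hdc : ¬ c < d := by omega
            have hsm : pvSign c d = 1 := by simp [pvSign, hcd, hdc]
            simp [pvTableLoop, pvComparisonVariantB, pvApply2, hab, hba, hcd, hdc, hsh, hsm,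
              show c ≠ d by omega]
    · have hab : a = b := by simpa [List.getD] using heq
      subst hab
      simp [Spec_compute_rank_pair_type, compute_rank_pair_type,
        compute_rank_pair_type_alt, pvComparisonVariantB, pvTableLoop, pvApply2, pvSign]
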